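-- pv_equiv track=rewrite | github.com/BerkeleyLab/Marble-MMC | scripts/ltm4673.py | MV_TO_L11
-- ===== SOURCE A (Python) =====
-- def MV_TO_L11(val):
--     """val is integer number of millivolts (or milliamps, milliwatts, etc)"""
--     # n is 5 bits (signed), can range from -16 to +15; 2**n can range from 15.26u to 32.768k
--     # y is 11 bits (signed), can range from -1024 to +1023
--     n = -16
--     val = (val << 16)//1000  # signed shift
--     while (val > 1023) or (val < -1024):
--         val = val >> 1
--         n += 1
--     packed = ((int(n) & 0x1f) << 11) + (int(val) & 0x7ff)
--     return packed
-- ===== SOURCE B (Python) =====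
-- def MV_TO_L11(val):
--     """val is integer number of millivolts (or milliamps, milliwatts, etc)"""
--     scaled = (val << 16) // 1000
--     if scaled > 1023:
--         k = scaled.bit_length() - 10
--     elif scaled < -1024:
--         k = (-scaled - 1).bit_length() - 10
--     else:
--         k = 0
--     n = -16 + k
--     final = scaled >> k
--     return ((n & 0x1f) << 11) + (final & 0x7ff)
-- ===== Notes on version B (the rewrite author's own statement) =====
-- stated objective: faster
-- what changed: Replaces A's shift-one-bit-at-a-time normalisation loop by a closed-form shift count computed from bit_length, then a single arithmetic right shift.
import Mathlib
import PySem

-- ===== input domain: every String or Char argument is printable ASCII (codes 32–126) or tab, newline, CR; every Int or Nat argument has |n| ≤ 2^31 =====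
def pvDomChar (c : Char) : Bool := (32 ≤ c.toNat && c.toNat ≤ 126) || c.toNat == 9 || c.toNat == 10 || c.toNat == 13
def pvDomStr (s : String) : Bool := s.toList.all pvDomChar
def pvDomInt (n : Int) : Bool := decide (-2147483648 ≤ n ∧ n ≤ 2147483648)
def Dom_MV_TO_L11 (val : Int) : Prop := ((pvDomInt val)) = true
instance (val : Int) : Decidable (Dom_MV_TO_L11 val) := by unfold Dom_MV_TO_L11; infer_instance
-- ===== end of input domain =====

-- B replaces A's normalisation loop by a closed-form shift count from bit_length (alternative decomposition).

-- ===== PORT A =====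
-- Python's arithmetic '>>' is Lean's '>>>' on Int; this fact is cited by the loop's termination proof.
theorem pvShiftHalf (v : Int) : v >>> (1:Nat) = v / 2 := by
  cases v with
  | ofNat m => show ((m >>> 1 : Nat) : Int) = ((m : Nat) : Int) / 2
               rw [Nat.shiftRight_succ, Nat.shiftRight_zero]; omega
  | negSucc m => show Int.negSucc (m >>> 1) = _
                 rw [Nat.shiftRight_succ, Nat.shiftRight_zero, Int.negSucc_eq, Int.negSucc_eq]; omega

-- the 'while (val > 1023) or (val < -1024)' loop over the state (val, n)
def MV_TO_L11_loop (v n : Int) : Int × Int :=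
  if v > 1023 ∨ v < -1024 then MV_TO_L11_loop (v >>> (1:Nat)) (n + 1) else (v, n)
termination_by v.natAbs
decreasing_by rw [pvShiftHalf]; omega

def MV_TO_L11 (val : Int) : Int :=
  -- Python's '&' is PySem.Int.band (exact on negatives), '<<' is '<<<', '//' is floordiv
  let p := MV_TO_L11_loop (PySem.Int.floordiv (val <<< 16) 1000) (-16)
  ((PySem.Int.band p.2 0x1f) <<< 11) + PySem.Int.band p.1 0x7ff

-- ===== PORT B =====
def MV_TO_L11_alt (val : Int) : Int :=
  let scaled := PySem.Int.floordiv (val <<< 16) 1000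
  -- Python's int.bit_length() is PySem.Int.bitLength (exact)
  let k : Nat := if scaled > 1023 then PySem.Int.bitLength scaled - 10
    else if scaled < -1024 then PySem.Int.bitLength (-scaled - 1) - 10
    else 0
  let n : Int := -16 + (k : Int)
  let final := scaled >>> k
  ((PySem.Int.band n 0x1f) <<< 11) + PySem.Int.band final 0x7ff

-- ===== PRECONDITION & SPEC =====
def Spec_MV_TO_L11 (val : Int) (out : Int) : Prop := out = MV_TO_L11_alt val
instance (val : Int) (out : Int) : Decidable (Spec_MV_TO_L11 val out) := by unfold Spec_MV_TO_L11; infer_instance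

-- ===== CLAIM (what is proved, stated in full; the proofs are below) =====
def Claim_equal_MV_TO_L11 : Prop := ∀ (val : Int), Dom_MV_TO_L11 val → Spec_MV_TO_L11 val (MV_TO_L11 val)

-- ===== LEMMAS AND PROOFS =====

-- the closed-form shift count (B's 'k') as a function, for the loop invariant
def pvK (v : Int) : Nat :=
  if v > 1023 then PySem.Int.bitLength v - 10
  else if v < -1024 then PySem.Int.bitLength (-v - 1) - 10
  else 0

theorem pvBLgt (a : Nat) (n : Int) (h : 2 ^ a ≤ n.natAbs) : a < PySem.Int.bitLength n := by
  have h2 := PySem.Int.lt_two_pow_bitLength n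
  exact (Nat.pow_lt_pow_iff_right (by norm_num)).mp (lt_of_le_of_lt h h2)

theorem pvBLle (a : Nat) (n : Int) (hn : n ≠ 0) (h : n.natAbs < 2 ^ a) : PySem.Int.bitLength n ≤ a := by
  by_contra hc
  have h2 := PySem.Int.two_pow_bitLength_le n hn
  have : (2:Nat) ^ a ≤ 2 ^ (PySem.Int.bitLength n - 1) := Nat.pow_le_pow_right (by norm_num) (by omega)
  omega

theorem pvKstep (v : Int) (h : v > 1023 ∨ v < -1024) : pvK (v >>> (1:Nat)) + 1 = pvK v := by
  rw [pvShiftHalf]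
  rcases h with h | h
  · have hfd : PySem.Int.floordiv v 2 = v / 2 := PySem.Int.floordiv_eq_ediv_of_pos (by omega)
    have hrec := PySem.Int.bitLength_of_pos (n := v) (by omega)
    rw [hfd] at hrec
    by_cases h2 : v / 2 > 1023
    · have h11 : 10 < PySem.Int.bitLength (v / 2) := pvBLgt 10 _ (by omega)
      simp only [pvK, if_pos h2, if_pos h]
      omega
    · have hb1 : 10 < PySem.Int.bitLength v := pvBLgt 10 v (by omega)
      have hb2 : PySem.Int.bitLength v ≤ 11 := pvBLle 11 v (by omega) (by omega)
      simp only [pvK, if_neg h2, if_neg (show ¬ v / 2 < -1024 by omega), if_pos h]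
      omega
  · have hfd : PySem.Int.floordiv (-v - 1) 2 = -(v / 2) - 1 := by
      rw [PySem.Int.floordiv_eq_ediv_of_pos (by omega : (0:Int) < 2)]; omega
    have hrec := PySem.Int.bitLength_of_pos (n := -v - 1) (by omega)
    rw [hfd] at hrec
    by_cases h2 : v / 2 < -1024
    · have h11 : 10 < PySem.Int.bitLength (-(v / 2) - 1) := pvBLgt 10 _ (by omega)
      simp only [pvK, if_neg (show ¬ v / 2 > 1023 by omega), if_pos h2,
                 if_neg (show ¬ v > 1023 by omega), if_pos h]
      omega
    · have hb1 : 10 < PySem.Int.bitLength (-v - 1) := pvBLgt 10 _ (by omega)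
      have hb2 : PySem.Int.bitLength (-v - 1) ≤ 11 := pvBLle 11 _ (by omega) (by omega)
      simp only [pvK, if_neg (show ¬ v / 2 > 1023 by omega), if_neg h2,
                 if_neg (show ¬ v > 1023 by omega), if_pos h]
      omega

theorem pvLoopEq : ∀ (k : Nat) (v n : Int), pvK v = k →
    MV_TO_L11_loop v n = (v >>> k, n + (k : Int)) := by
  intro k
  induction k with
  | zero =>
    intro v n hk
    have hin : ¬ (v > 1023 ∨ v < -1024) := by
      intro h; have := pvKstep v h; omega
    rw [MV_TO_L11_loop, if_neg hin]
    simp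
  | succ k ih =>
    intro v n hk
    have hout : v > 1023 ∨ v < -1024 := by
      by_contra hc
      rw [not_or] at hc
      have : pvK v = 0 := by
        simp only [pvK, if_neg (show ¬ v > 1023 by omega), if_neg (show ¬ v < -1024 by omega)]
      omega
    have hstep := pvKstep v hout
    rw [MV_TO_L11_loop, if_pos hout, ih _ _ (by omega)]
    have hsh : (v >>> (1:Nat)) >>> k = v >>> (k + 1) := by
      rw [← Int.shiftRight_add, Nat.add_comm]
    rw [hsh]
    congr 1
    push_cast
    ring

-- ===== VERDICT (by name: the statement is the Claim_ definition above) =====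
theorem MV_TO_L11_spec : Claim_equal_MV_TO_L11 := by
  intro val _
  unfold Spec_MV_TO_L11 MV_TO_L11 MV_TO_L11_alt
  simp only []
  rw [pvLoopEq (pvK (PySem.Int.floordiv (val <<< 16) 1000)) _ _ rfl]
  simp only [pvK]
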